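-- pv_equiv track=rewrite | github.com/ClaireSalome/Projet_MADMC | algos.py | algo_tri_lex
-- ===== SOURCE A (Python) =====
-- from copy import deepcopy
--
-- def algo_tri_lex(vectors):
--     non_domines = []
--     sorted_vect = deepcopy(vectors)
--     sorted_vect.sort(key=lambda colonne: (colonne[0], colonne[1]))
--     vect_min = sorted_vect[0]
--     c2_min = vect_min[1]
--     # Le min sur le critère est forcément non dominé
--     non_domines.append(vect_min)
--     # pour tous les autres critèrs avec c1 > vect_min[0]
--     for i in range(1, len(sorted_vect)):
--         if (sorted_vect[i][0] > vect_min[0]):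
--             # comme liste est triée, pour le premier vecteur d'un c1 > vect_min[0]
--             # si son c2 est > au c2_min, tous les autres le seront aussi
--             # donc on peut passer au prochain c1
--             vect_min = sorted_vect[i]
--             # si un c2 est < vect_min[1] on garde ce c2 en tant que min
--             # puis on cherche un autre c2 qui serait inférieur à ce min
--             if sorted_vect[i][1] < c2_min:
--                 non_domines.append(sorted_vect[i])
--                 c2_min = vect_min[1]
--
--     return non_domines
-- ===== SOURCE B (Python) =====
-- def algo_tri_lex(vectors):
--     s = sorted(vectors, key=lambda v: (v[0], v[1]))
--     result = []
--     for i, v in enumerate(s):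
--         if all(v[1] < u[1] for u in s[:i]):
--             result.append(v)
--     return result
-- ===== Notes on version B (the rewrite author's own statement) =====
-- stated objective: simpler
-- what changed: Replaces A's single-pass loop with a running c2 minimum and a tracked last-new-c1 vector by the definition applied per element: after the same lexicographic sort, keep a point iff its c2 is strictly below the c2 of every earlier sorted point (prefix all-scan).
import Mathlib
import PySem

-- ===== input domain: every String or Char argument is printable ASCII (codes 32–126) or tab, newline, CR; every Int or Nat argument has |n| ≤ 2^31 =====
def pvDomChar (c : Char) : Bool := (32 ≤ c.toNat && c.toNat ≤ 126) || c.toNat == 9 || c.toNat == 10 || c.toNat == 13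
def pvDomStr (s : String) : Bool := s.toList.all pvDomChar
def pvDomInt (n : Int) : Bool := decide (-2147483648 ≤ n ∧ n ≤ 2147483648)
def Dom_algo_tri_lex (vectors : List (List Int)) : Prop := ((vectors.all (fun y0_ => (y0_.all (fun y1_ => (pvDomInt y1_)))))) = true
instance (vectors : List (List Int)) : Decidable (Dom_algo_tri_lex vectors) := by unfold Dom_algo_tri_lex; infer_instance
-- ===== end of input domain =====

-- B replaces A's running-minimum single pass (after the same lexicographic sort) by the
-- Pareto definition applied per element: keep a point iff its c2 beats every earlier point's c2.


-- ===== PORT A =====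
-- v[i] for i = 0, 1: exact under Pre_ (every inner list has length ≥ 2); Python raises IndexError otherwise
def pvG (v : List Int) (i : Int) : Int := PySem.List.pyGetD v i 0

-- body of A's 'for i in range(1, len(sorted_vect))' loop; state = (non_domines, vect_min, c2_min)
def pvStepA (st : List (List Int) × List Int × Int) (v : List Int) : List (List Int) × List Int × Int :=
  if pvG v 0 > pvG st.2.1 0 then
    if pvG v 1 < st.2.2 then (st.1 ++ [v], v, pvG v 1) else (st.1, v, st.2.2)
  else st

def algo_tri_lex (vectors : List (List Int)) : List (List Int) :=
  let sorted_vect := PySem.List.sorted2 vectors (fun c => pvG c 0) (fun c => pvG c 1)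
  match sorted_vect with
  | [] => []   -- Python raises IndexError on sorted_vect[0] here; excluded by Pre_
  | vect_min :: rest =>
      (rest.foldl pvStepA ([vect_min], vect_min, pvG vect_min 1)).1

-- ===== PORT B =====
-- body of B's 'for i, v in enumerate(s)' loop; s[:i] = take i (the index from enumerate is ≥ 0)
def pvStepB (s : List (List Int)) (res : List (List Int)) (iv : Int × List Int) : List (List Int) :=
  if (s.take iv.1.toNat).all (fun u => decide (pvG iv.2 1 < pvG u 1)) then res ++ [iv.2] else res

def algo_tri_lex_alt (vectors : List (List Int)) : List (List Int) :=
  let s := PySem.List.sorted2 vectors (fun v => pvG v 0) (fun v => pvG v 1)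
  (PySem.List.enumerate s).foldl (pvStepB s) []

-- ===== PRECONDITION & SPEC =====
-- exactly where the Python A returns: a nonempty list (else sorted_vect[0] raises IndexError)
-- whose inner lists all have length ≥ 2 (else v[0]/v[1] raises IndexError)
def Pre_algo_tri_lex (vectors : List (List Int)) : Prop :=
  vectors ≠ [] ∧ ∀ v ∈ vectors, 2 ≤ v.length
instance (vectors : List (List Int)) : Decidable (Pre_algo_tri_lex vectors) := by unfold Pre_algo_tri_lex; infer_instance

def pvWitness_algo_tri_lex : List (List Int) := [[1, 2], [2, 1]]

def Spec_algo_tri_lex (vectors : List (List Int)) (out : List (List Int)) : Prop := out = algo_tri_lex_alt vectors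
instance (vectors : List (List Int)) (out : List (List Int)) : Decidable (Spec_algo_tri_lex vectors out) := by unfold Spec_algo_tri_lex; infer_instance

-- ===== CLAIM (what is proved, stated in full; the proofs are below) =====
def Claim_equal_algo_tri_lex : Prop := ∀ (vectors : List (List Int)), Dom_algo_tri_lex vectors → Pre_algo_tri_lex vectors → Spec_algo_tri_lex vectors (algo_tri_lex vectors)

-- ===== LEMMAS AND PROOFS =====

-- the order the lexicographic sort leaves the list in
def pvKeyLe (u v : List Int) : Prop :=
  pvG u 0 < pvG v 0 ∨ (pvG u 0 = pvG v 0 ∧ pvG u 1 ≤ pvG v 1)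

-- sorted2's comparator is exactly the strict lexicographic order on the key pair
theorem pvSorted2_eq_sorted_lex (xs : List (List Int)) :
    PySem.List.sorted2 xs (fun c => pvG c 0) (fun c => pvG c 1) =
    PySem.List.sorted xs (fun c => toLex (pvG c 0, pvG c 1)) false := by
  unfold PySem.List.sorted2 PySem.List.sorted
  simp only [if_neg (by decide : ¬ (false = true))]
  congr 1
  funext acc x
  congr 1
  funext a b
  by_cases h1 : pvG a 0 < pvG b 0 <;> by_cases h2 : pvG b 0 < pvG a 0 <;>
    by_cases h3 : pvG a 1 < pvG b 1 <;> simp [h1, h2, h3, Prod.Lex.lt_iff] <;> omega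

theorem pvSorted2_pairwise (xs : List (List Int)) :
    (PySem.List.sorted2 xs (fun c => pvG c 0) (fun c => pvG c 1)).Pairwise pvKeyLe := by
  rw [pvSorted2_eq_sorted_lex]
  have h := PySem.List.sorted_pairwise (xs := xs) (key := fun c => toLex (pvG c 0, pvG c 1))
  exact h.imp (fun hab => by simpa [Prod.Lex.le_iff, pvKeyLe] using hab)

-- loop invariant: along the sorted list s = pref ++ t, A's state satisfies
-- vect_min has the maximal c1 of pref and c2_min is the (attained) minimal c2 of pref;
-- then A appends v iff v's c2 is strictly below every c2 in pref — B's per-element test.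
theorem pvMain (s : List (List Int)) :
    ∀ (t pref : List (List Int)) (vm : List Int) (c2m : Int) (acc : List (List Int)),
      s = pref ++ t → s.Pairwise pvKeyLe → vm ∈ pref →
      (∀ u ∈ pref, pvG u 0 ≤ pvG vm 0) →
      (∀ u ∈ pref, c2m ≤ pvG u 1) →
      (∃ u ∈ pref, c2m = pvG u 1) →
      (t.foldl pvStepA (acc, vm, c2m)).1 =
      (PySem.List.enumerate t (pref.length : Int)).foldl (pvStepB s) acc := by
  intro t
  induction t with
  | nil => intro pref vm c2m acc _ _ _ _ _ _; simp [PySem.List.enumerate_nil]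
  | cons v t' ih =>
    intro pref vm c2m acc hs hp hvm hmax hlb hach
    obtain ⟨u0, hu0, hc⟩ := hach
    have hpv : ∀ a ∈ pref, pvKeyLe a v := by
      rw [hs, List.pairwise_append] at hp
      exact fun a ha => hp.2.2 a ha v (List.mem_cons_self ..)
    have htake : s.take pref.length = pref := by rw [hs]; exact List.take_left ..
    rw [PySem.List.enumerate_cons, List.foldl_cons, List.foldl_cons]
    have hstepB : pvStepB s acc ((pref.length : Int), v) =
        (if pref.all (fun u => decide (pvG v 1 < pvG u 1)) then acc ++ [v] else acc) := by
      simp [pvStepB, htake]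
    have hs' : s = (pref ++ [v]) ++ t' := by simp [hs]
    have hlen : ((pref.length : Int) + 1) = (((pref ++ [v]).length : Nat) : Int) := by
      simp [List.length_append]
    by_cases hall : ∀ u ∈ pref, pvG v 1 < pvG u 1
    · have hlt : pvG v 1 < c2m := hc ▸ hall u0 hu0
      have hg0 : pvG vm 0 < pvG v 0 := by
        rcases hpv vm hvm with h | ⟨_, hle⟩
        · exact h
        · exact absurd (hall vm hvm) (by omega)
      have hA : pvStepA (acc, vm, c2m) v = (acc ++ [v], v, pvG v 1) := by
        simp [pvStepA, hg0, hlt]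
      rw [hA, hstepB, if_pos (by simpa [List.all_eq_true] using hall), hlen]
      exact ih (pref ++ [v]) v (pvG v 1) (acc ++ [v]) hs' hp (by simp)
        (fun u hu => by rcases List.mem_append.1 hu with h | h
                        · exact le_of_lt (lt_of_le_of_lt (hmax u h) hg0)
                        · simp at h; simp [h])
        (fun u hu => by rcases List.mem_append.1 hu with h | h
                        · exact le_of_lt (hall u h)
                        · simp at h; simp [h])
        ⟨v, by simp⟩
    · push Not at hall
      obtain ⟨u1, hu1, hle1⟩ := hall
      have hcv : c2m ≤ pvG v 1 := le_trans (hlb u1 hu1) hle1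
      have hcond : ¬ (pref.all (fun u => decide (pvG v 1 < pvG u 1)) = true) := by
        simp [List.all_eq_true]
        exact ⟨u1, hu1, hle1⟩
      rw [hstepB, if_neg hcond, hlen]
      by_cases hg : pvG vm 0 < pvG v 0
      · have hA : pvStepA (acc, vm, c2m) v = (acc, v, c2m) := by
          have hn : ¬ pvG v 1 < c2m := by omega
          simp [pvStepA, hg, hn]
        rw [hA]
        exact ih (pref ++ [v]) v c2m acc hs' hp (by simp)
          (fun u hu => by rcases List.mem_append.1 hu with h | h
                          · exact le_of_lt (lt_of_le_of_lt (hmax u h) hg)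
                          · simp at h; simp [h])
          (fun u hu => by rcases List.mem_append.1 hu with h | h
                          · exact hlb u h
                          · simp at h; simp [h, hcv])
          ⟨u0, by simp [hu0], hc⟩
      · have hA : pvStepA (acc, vm, c2m) v = (acc, vm, c2m) := by
          simp [pvStepA, hg]
        rw [hA]
        exact ih (pref ++ [v]) vm c2m acc hs' hp (by simp [hvm])
          (fun u hu => by rcases List.mem_append.1 hu with h | h
                          · exact hmax u h
                          · simp at h; simp [h]; omega)
          (fun u hu => by rcases List.mem_append.1 hu with h | h
                          · exact hlb u h
                          · simp at h; simp [h, hcv])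
          ⟨u0, by simp [hu0], hc⟩

theorem pvPortsAgree (vectors : List (List Int)) :
    algo_tri_lex vectors = algo_tri_lex_alt vectors := by
  unfold algo_tri_lex algo_tri_lex_alt
  have hpw := pvSorted2_pairwise vectors
  cases hs : PySem.List.sorted2 vectors (fun c => pvG c 0) (fun c => pvG c 1) with
  | nil => simp [PySem.List.enumerate_nil]
  | cons h t =>
    rw [hs] at hpw
    simp only
    rw [PySem.List.enumerate_cons, List.foldl_cons]
    have h0 : pvStepB (h :: t) [] ((0 : Int), h) = [h] := by simp [pvStepB]
    rw [h0]
    simpa using pvMain (h :: t) t [h] h (pvG h 1) [h] rfl hpw (by simp)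
      (by simp) (by simp) ⟨h, by simp⟩

-- ===== VERDICT (by name: the statement is the Claim_ definition above) =====
theorem algo_tri_lex_spec : Claim_equal_algo_tri_lex :=
  fun vectors _ _ => pvPortsAgree vectors
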